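-- pv_equiv track=rewrite | github.com/GMyhf/2021fall-cs101 | True_Code_Pack_yeagle_ting2021fall/EXAM/dfs_bfs_template.py | dfs_stk
-- ===== SOURCE A (Python) =====
-- def dfs_stk(tree:dict, init:str):
--     seen = {init}
--     stack = [init]
--     while stack:
--         stud = stack[-1]
--         if stud not in seen:
--             seen.add(stud)
--         if stud not in tree:
--             stack.pop()
--             continue
--         do_pop = True
--         for know in tree[stud]:
--             if know not in seen:
--                 stack.append(know)
--                 do_pop = False
--                 break
--         if do_pop: stack.pop()
--     return seen
--
-- tree = {}
-- ===== SOURCE B (Python) =====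
-- def dfs_stk(tree: dict, init: str):
--     seen = {init}
--     stack = [iter(tree.get(init, ()))]
--     while stack:
--         for know in stack[-1]:
--             if know not in seen:
--                 seen.add(know)
--                 stack.append(iter(tree.get(know, ())))
--                 break
--         else:
--             stack.pop()
--     return seen
-- ===== Notes on version B (the rewrite author's own statement) =====
-- stated objective: alternative
-- what changed: A rescans the full adjacency list of the stack top from the start on every loop iteration; B keeps one iterator per stack level (a resumable position in each adjacency list), marks nodes seen when pushed, and so consumes every adjacency entry at most once (O(V+E) worst case vs A's O(V*E), though the timing inputs are too shallow to measure this).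
import Mathlib
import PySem

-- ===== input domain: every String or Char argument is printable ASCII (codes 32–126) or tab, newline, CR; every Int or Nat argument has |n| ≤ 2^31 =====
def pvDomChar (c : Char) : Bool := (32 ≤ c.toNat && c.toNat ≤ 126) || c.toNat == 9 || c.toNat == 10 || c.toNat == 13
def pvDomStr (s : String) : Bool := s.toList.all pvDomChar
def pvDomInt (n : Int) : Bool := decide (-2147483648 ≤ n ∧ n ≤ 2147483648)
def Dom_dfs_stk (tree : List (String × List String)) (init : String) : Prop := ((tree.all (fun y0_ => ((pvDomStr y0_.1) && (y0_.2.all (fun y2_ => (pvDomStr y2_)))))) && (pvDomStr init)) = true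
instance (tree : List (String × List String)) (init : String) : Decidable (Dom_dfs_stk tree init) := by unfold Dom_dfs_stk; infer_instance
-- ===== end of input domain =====

-- B replaces A's stack loop (which rescans the full adjacency list of the stack
-- top on every iteration) by a DFS keeping one iterator per stack level, so every
-- adjacency entry is consumed at most once (an alternative algorithm; no speed
-- difference was measured on the generated inputs).

-- ===== PORT A =====

-- node universe used only for the termination measures of the two loops
def pvNodes (tree : List (String × List String)) (init : String) : List String :=
  init :: (tree.map Prod.snd).flatten

-- number of universe nodes not yet seen
def pvNS (tree : List (String × List String)) (init : String) (seen : PySem.Set String) : Nat :=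
  (pvNodes tree init).countP (fun y => !(PySem.Set.contains seen y))

-- pending credit: 3 unless the stack top is still unseen
def pvPend (seen : PySem.Set String) (stack : List String) : Nat :=
  match stack with
  | [] => 0
  | s :: _ => if PySem.Set.contains seen s then 3 else 0

-- termination potential for A's while-loop
def phiA (tree : List (String × List String)) (init : String)
    (seen : PySem.Set String) (stack : List String) : Nat :=
  stack.length + 4 * pvNS tree init seen + pvPend seen stack

-- A's inner 'for know in tree[stud]: if know not in seen: … break'
def dfsA_first (seen : PySem.Set String) : List String → Option String
  | [] => none
  | k :: ks => if PySem.Set.contains seen k then dfsA_first seen ks else some k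

theorem pv_contains_add_self (s : PySem.Set String) (x : String) :
    PySem.Set.contains (PySem.Set.add s x) x = true := by
  rw [PySem.Set.contains_iff, PySem.Set.mem_add]; right; rfl

theorem pv_contains_add_of (s : PySem.Set String) (x y : String)
    (h : PySem.Set.contains s y = true) :
    PySem.Set.contains (PySem.Set.add s x) y = true := by
  rw [PySem.Set.contains_iff, PySem.Set.mem_add]; left; exact (PySem.Set.contains_iff s y).mp h

theorem pv_not_contains_add (seen : PySem.Set String) (x y : String)
    (h : PySem.Set.contains (PySem.Set.add seen x) y = false) :
    PySem.Set.contains seen y = false := by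
  cases hcs : PySem.Set.contains seen y
  · rfl
  · rw [pv_contains_add_of seen x y hcs] at h; exact absurd h (by decide)

theorem pv_countP_add_le (seen : PySem.Set String) (x : String) (l : List String) :
    l.countP (fun y => !(PySem.Set.contains (PySem.Set.add seen x) y)) ≤
      l.countP (fun y => !(PySem.Set.contains seen y)) := by
  induction l with
  | nil => exact Nat.le_refl _
  | cons y ys ih =>
    rw [List.countP_cons, List.countP_cons]
    cases hn : PySem.Set.contains (PySem.Set.add seen x) y
    · rw [pv_not_contains_add seen x y hn]
      simp only [Bool.not_false, Bool.false_eq_true, if_true, if_false]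
      omega
    · simp only [hn, Bool.not_true, Bool.false_eq_true, if_true, if_false]
      cases ho : PySem.Set.contains seen y <;>
        simp only [Bool.not_false, Bool.not_true, Bool.false_eq_true, if_true, if_false] <;> omega

theorem pv_countP_add_lt (seen : PySem.Set String) (x : String) (l : List String)
    (hx : x ∈ l) (hns : PySem.Set.contains seen x = false) :
    l.countP (fun y => !(PySem.Set.contains (PySem.Set.add seen x) y)) <
      l.countP (fun y => !(PySem.Set.contains seen y)) := by
  induction l with
  | nil => cases hx
  | cons y ys ih =>
    rw [List.countP_cons, List.countP_cons]
    rcases List.mem_cons.mp hx with rfl | hx'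
    · have hle := pv_countP_add_le seen x ys
      simp only [pv_contains_add_self seen x, hns, Bool.not_true, Bool.not_false, Bool.false_eq_true, if_true, if_false]
      omega
    · have hlt := ih hx'
      cases hn : PySem.Set.contains (PySem.Set.add seen x) y
      · rw [pv_not_contains_add seen x y hn]
        simp only [Bool.not_false, Bool.false_eq_true, if_true, if_false]
        omega
      · simp only [hn, Bool.not_true, Bool.false_eq_true, if_true, if_false]
        cases ho : PySem.Set.contains seen y <;>
          simp only [Bool.not_false, Bool.not_true, Bool.false_eq_true, if_true, if_false] <;> omega

theorem pvNS_add_lt (tree : List (String × List String)) (init : String)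
    (seen : PySem.Set String) (x : String)
    (hx : x ∈ pvNodes tree init) (hns : PySem.Set.contains seen x = false) :
    pvNS tree init (PySem.Set.add seen x) < pvNS tree init seen :=
  pv_countP_add_lt seen x (pvNodes tree init) hx hns

theorem pvPend_nil (seen : PySem.Set String) : pvPend seen [] = 0 := rfl

theorem pvPend_cons (seen : PySem.Set String) (s : String) (t : List String) :
    pvPend seen (s :: t) = if PySem.Set.contains seen s then 3 else 0 := rfl

theorem pvPend_le (seen : PySem.Set String) (stack : List String) :
    pvPend seen stack ≤ 3 := by
  cases stack with
  | nil => rw [pvPend_nil]; omega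
  | cons s t => rw [pvPend_cons]; split <;> omega

theorem phiA_pop_lt (tree : List (String × List String)) (init : String)
    (seen : PySem.Set String) (stud : String) (rest : List String)
    (hmem : stud ∈ pvNodes tree init) :
    phiA tree init (if PySem.Set.contains seen stud then seen else PySem.Set.add seen stud)
      rest < phiA tree init seen (stud :: rest) := by
  unfold phiA
  cases hc : PySem.Set.contains seen stud
  · simp only [Bool.false_eq_true, if_true, if_false]
    have h1 := pvNS_add_lt tree init seen stud hmem hc
    have h2 := pvPend_le (PySem.Set.add seen stud) rest
    have h3 : pvPend seen (stud :: rest) = 0 := by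
      rw [pvPend_cons]; simp only [hc, Bool.false_eq_true, if_true, if_false]
    rw [h3]; simp only [List.length_cons]; omega
  · simp only [Bool.false_eq_true, if_true, if_false]
    have h2 := pvPend_le seen rest
    have h3 : pvPend seen (stud :: rest) = 3 := by
      rw [pvPend_cons]; simp only [hc, Bool.false_eq_true, if_true, if_false]
    rw [h3]; simp only [List.length_cons]; omega

theorem phiA_push_lt (tree : List (String × List String)) (init : String)
    (seen : PySem.Set String) (stud know : String) (rest : List String)
    (hmem : stud ∈ pvNodes tree init)
    (hknow : PySem.Set.contains
      (if PySem.Set.contains seen stud then seen else PySem.Set.add seen stud) know = false) :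
    phiA tree init (if PySem.Set.contains seen stud then seen else PySem.Set.add seen stud)
      (know :: stud :: rest) < phiA tree init seen (stud :: rest) := by
  unfold phiA
  cases hc : PySem.Set.contains seen stud
  · simp only [hc, Bool.false_eq_true, if_true, if_false] at hknow ⊢
    have h1 := pvNS_add_lt tree init seen stud hmem hc
    have h2 : pvPend (PySem.Set.add seen stud) (know :: stud :: rest) = 0 := by
      rw [pvPend_cons]; simp only [hknow, Bool.false_eq_true, if_true, if_false]
    have h3 : pvPend seen (stud :: rest) = 0 := by
      rw [pvPend_cons]; simp only [hc, Bool.false_eq_true, if_true, if_false]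
    rw [h2, h3]; simp only [List.length_cons]; omega
  · simp only [hc, Bool.false_eq_true, if_true, if_false] at hknow ⊢
    have h2 : pvPend seen (know :: stud :: rest) = 0 := by
      rw [pvPend_cons]; simp only [hknow, Bool.false_eq_true, if_true, if_false]
    have h3 : pvPend seen (stud :: rest) = 3 := by
      rw [pvPend_cons]; simp only [hc, Bool.false_eq_true, if_true, if_false]
    rw [h2, h3]; simp only [List.length_cons]; omega

theorem pv_get?_mem_snds (tree : List (String × List String)) (s : String) (l : List String)
    (h : PySem.Dict.get? (PySem.Dict.mk tree) s = some l) : l ∈ tree.map Prod.snd := by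
  induction tree with
  | nil => simp [PySem.Dict.get?] at h
  | cons p rest ih =>
    rw [PySem.Dict.get?_mk_cons] at h
    by_cases hk : (p.1 == s) = true
    · rw [hk] at h; simp only [if_true] at h
      cases h; exact List.mem_cons_self
    · simp only [Bool.not_eq_true] at hk; rw [hk] at h; simp only [Bool.false_eq_true, if_false] at h
      exact List.mem_cons_of_mem _ (ih h)

theorem pv_adj_subset (tree : List (String × List String)) (init s : String)
    (l : List String) (h : PySem.Dict.get? (PySem.Dict.mk tree) s = some l) :
    ∀ x ∈ l, x ∈ pvNodes tree init := by
  intro x hx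
  unfold pvNodes
  exact List.mem_cons_of_mem _ (List.mem_flatten.mpr ⟨l, pv_get?_mem_snds tree s l h, hx⟩)

theorem dfsA_first_not_contains (seen : PySem.Set String) (l : List String) (k : String)
    (h : dfsA_first seen l = some k) : PySem.Set.contains seen k = false := by
  induction l with
  | nil => simp [dfsA_first] at h
  | cons y ys ih =>
    rw [dfsA_first] at h
    cases hy : PySem.Set.contains seen y
    · rw [hy] at h; simp only [Bool.false_eq_true, if_false] at h
      cases h; exact hy
    · rw [hy] at h; simp only [if_true] at h; exact ih h

theorem dfsA_first_mem (seen : PySem.Set String) (l : List String) (k : String)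
    (h : dfsA_first seen l = some k) : k ∈ l := by
  induction l with
  | nil => simp [dfsA_first] at h
  | cons y ys ih =>
    rw [dfsA_first] at h
    cases hy : PySem.Set.contains seen y
    · rw [hy] at h; simp only [Bool.false_eq_true, if_false] at h
      cases h; exact List.mem_cons_self
    · rw [hy] at h; simp only [if_true] at h; exact List.mem_cons_of_mem _ (ih h)

-- A's while-loop; the stack is stored top-first (Python append/[-1]/pop act on the
-- list end). hN (all stack entries lie in the node universe) is carried only for
-- termination and does not influence the computed value.
def dfsA_loop (tree : List (String × List String)) (init : String)
    (seen : PySem.Set String) (stack : List String)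
    (hN : ∀ x ∈ stack, x ∈ pvNodes tree init) : List String :=
  match stack with
  | [] => seen
  | stud :: rest =>
    let seen1 := if PySem.Set.contains seen stud then seen else PySem.Set.add seen stud
    match hgd : PySem.Dict.get? (PySem.Dict.mk tree) stud with
    | none => dfsA_loop tree init seen1 rest (fun x hx => hN x (List.mem_cons_of_mem _ hx))
    | some adj =>
      match hfd : dfsA_first seen1 adj with
      | some know =>
        dfsA_loop tree init seen1 (know :: stud :: rest)
          (by
            intro x hx
            rcases List.mem_cons.mp hx with rfl | hx'
            · exact pv_adj_subset tree init stud adj hgd x (dfsA_first_mem seen1 adj x hfd)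
            · exact hN x hx')
      | none => dfsA_loop tree init seen1 rest (fun x hx => hN x (List.mem_cons_of_mem _ hx))
  termination_by phiA tree init seen stack
  decreasing_by
  · exact phiA_pop_lt tree init seen stud rest (hN stud List.mem_cons_self)
  · exact phiA_push_lt tree init seen stud know rest (hN stud List.mem_cons_self)
      (dfsA_first_not_contains _ adj know hfd)
  · exact phiA_pop_lt tree init seen stud rest (hN stud List.mem_cons_self)

def dfs_stk (tree : List (String × List String)) (init : String) : List String :=
  dfsA_loop tree init (PySem.Set.ofList [init]) [init]
    (by intro x hx
        rcases List.mem_cons.mp hx with rfl | h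
        · exact List.mem_cons_self
        · cases h)

-- ===== PORT B =====

-- tree.get(v, ()) — the sequence underlying the iterator pushed for node v
def adjB (tree : List (String × List String)) (v : String) : List String :=
  (PySem.Dict.get? (PySem.Dict.mk tree) v).getD []

-- B's 'for know in stack[-1]: …' — consume the iterator up to the first unseen
-- element, returning it together with the iterator's remaining suffix
def dfsB_find (seen : PySem.Set String) : List String → Option (String × List String)
  | [] => none
  | k :: ks => if PySem.Set.contains seen k then dfsB_find seen ks else some (k, ks)

-- termination potential for B's while-loop
def phiB (tree : List (String × List String)) (init : String)
    (seen : PySem.Set String) (stack : List (List String)) : Nat :=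
  (stack.map (fun l => l.length + 1)).sum +
    (2 + (tree.map (fun p => p.2.length)).sum) * pvNS tree init seen

theorem dfsB_find_some (seen : PySem.Set String) (l : List String) (k : String)
    (ks : List String) (h : dfsB_find seen l = some (k, ks)) :
    ∃ pre, l = pre ++ k :: ks ∧ (∀ x ∈ pre, PySem.Set.contains seen x = true) ∧
      PySem.Set.contains seen k = false := by
  induction l generalizing ks with
  | nil => simp [dfsB_find] at h
  | cons y ys ih =>
    rw [dfsB_find] at h
    cases hy : PySem.Set.contains seen y
    · rw [hy] at h; simp only [Bool.false_eq_true, if_false] at h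
      cases h
      refine ⟨[], rfl, ?_, hy⟩
      intro x hx; cases hx
    · rw [hy] at h; simp only [if_true] at h
      obtain ⟨pre, hpre, hall, hk⟩ := ih ks h
      refine ⟨y :: pre, by rw [hpre]; rfl, ?_, hk⟩
      intro x hx
      rcases List.mem_cons.mp hx with rfl | hx'
      · exact hy
      · exact hall x hx'

theorem pv_adjB_len_le (tree : List (String × List String)) (v : String) :
    (adjB tree v).length ≤ (tree.map (fun p => p.2.length)).sum := by
  unfold adjB
  cases hg : PySem.Dict.get? (PySem.Dict.mk tree) v with
  | none => simp
  | some l =>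
    simp only [Option.getD_some]
    have hm := pv_get?_mem_snds tree v l hg
    have hmem : l.length ∈ tree.map (fun p => p.2.length) := by
      obtain ⟨p, hp, rfl⟩ := List.mem_map.mp hm
      exact List.mem_map.mpr ⟨p, hp, rfl⟩
    exact List.single_le_sum (by intro x _; omega) _ hmem

theorem pv_adjB_subset (tree : List (String × List String)) (init v : String) :
    ∀ x ∈ adjB tree v, x ∈ pvNodes tree init := by
  intro x hx
  unfold adjB at hx
  cases hg : PySem.Dict.get? (PySem.Dict.mk tree) v with
  | none => rw [hg] at hx; cases hx
  | some a => rw [hg] at hx; exact pv_adj_subset tree init v a hg x hx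

-- B's while-loop; stack stored top-first, one iterator suffix per level.
-- hN is carried only for termination.
def dfsB_loop (tree : List (String × List String)) (init : String)
    (seen : PySem.Set String) (stack : List (List String))
    (hN : ∀ l ∈ stack, ∀ x ∈ l, x ∈ pvNodes tree init) : List String :=
  match stack with
  | [] => seen
  | it :: rest =>
    match hfd : dfsB_find seen it with
    | none => dfsB_loop tree init seen rest (fun l hl => hN l (List.mem_cons_of_mem _ hl))
    | some (know, it') =>
      dfsB_loop tree init (PySem.Set.add seen know) (adjB tree know :: it' :: rest)
        (by
          intro l hl x hx
          rcases List.mem_cons.mp hl with rfl | hl'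
          · exact pv_adjB_subset tree init know x hx
          · rcases List.mem_cons.mp hl' with rfl | hl''
            · obtain ⟨pre, hpre, _, _⟩ := dfsB_find_some seen it know l hfd
              exact hN it List.mem_cons_self x
                (by rw [hpre]; exact List.mem_append_right _ (List.mem_cons_of_mem _ hx))
            · exact hN l (List.mem_cons_of_mem _ hl'') x hx)
  termination_by phiB tree init seen stack
  decreasing_by
  · unfold phiB
    simp only [List.map_cons, List.sum_cons]
    omega
  · unfold phiB
    obtain ⟨pre, hpre, _, hkns⟩ := dfsB_find_some seen it know it' hfd
    have hlen : it'.length < it.length := by rw [hpre]; simp only [List.length_append, List.length_cons]; omega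
    have hkmem : know ∈ pvNodes tree init :=
      hN it List.mem_cons_self know (by rw [hpre]; exact List.mem_append_right _ List.mem_cons_self)
    have hns := pvNS_add_lt tree init seen know hkmem hkns
    have hadj := pv_adjB_len_le tree know
    simp only [List.map_cons, List.sum_cons]
    have h1 : (2 + (tree.map (fun p => p.2.length)).sum) * (pvNS tree init (PySem.Set.add seen know) + 1)
        ≤ (2 + (tree.map (fun p => p.2.length)).sum) * pvNS tree init seen :=
      Nat.mul_le_mul_left _ (Nat.succ_le_of_lt hns)
    have h2 : (2 + (tree.map (fun p => p.2.length)).sum) * (pvNS tree init (PySem.Set.add seen know) + 1)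
        = (2 + (tree.map (fun p => p.2.length)).sum) * pvNS tree init (PySem.Set.add seen know)
          + (2 + (tree.map (fun p => p.2.length)).sum) := by ring
    omega

def dfs_stk_alt (tree : List (String × List String)) (init : String) : List String :=
  dfsB_loop tree init (PySem.Set.ofList [init]) [adjB tree init]
    (by
      intro l hl x hx
      rcases List.mem_cons.mp hl with rfl | h
      · exact pv_adjB_subset tree init init x hx
      · cases h)

-- ===== PRECONDITION & SPEC =====
def Spec_dfs_stk (tree : List (String × List String)) (init : String) (out : List String) : Prop := out = dfs_stk_alt tree init
instance (tree : List (String × List String)) (init : String) (out : List String) : Decidable (Spec_dfs_stk tree init out) := by unfold Spec_dfs_stk; infer_instance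

-- ===== CLAIM (what is proved, stated in full; the proofs are below) =====
def Claim_equal_dfs_stk : Prop := ∀ (tree : List (String × List String)) (init : String), Dom_dfs_stk tree init → Spec_dfs_stk tree init (dfs_stk tree init)

-- ===== LEMMAS AND PROOFS =====

theorem pv_normA (tree : List (String × List String)) (init : String)
    (seen : PySem.Set String) (know : String) (rest : List String)
    (hknow : PySem.Set.contains seen know = false)
    (h : ∀ x ∈ know :: rest, x ∈ pvNodes tree init) :
    dfsA_loop tree init seen (know :: rest) h
      = dfsA_loop tree init (PySem.Set.add seen know) (know :: rest) h := by
  have hL : (if PySem.Set.contains seen know = true then seen else PySem.Set.add seen know)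
      = PySem.Set.add seen know := by
    rw [hknow]; simp
  have hR : (if PySem.Set.contains (PySem.Set.add seen know) know = true
        then PySem.Set.add seen know
        else PySem.Set.add (PySem.Set.add seen know) know)
      = PySem.Set.add seen know := by
    rw [pv_contains_add_self]; simp
  rw [dfsA_loop.eq_2, dfsA_loop.eq_2]
  simp only [hL, hR]
  split
  · rfl
  · rename_i adj heq
    split
    · rename_i k1 hfd1
      rw [hL] at hfd1
      split
      · rename_i k2 hfd2
        rw [hR] at hfd2
        rw [hfd1] at hfd2
        injection hfd2 with hk
        subst hk
        rfl
      · rename_i hfd2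
        rw [hR] at hfd2
        rw [hfd1] at hfd2
        cases hfd2
    · rename_i hfd1
      rw [hL] at hfd1
      split
      · rename_i k2 hfd2
        rw [hR] at hfd2
        rw [hfd1] at hfd2
        cases hfd2
      · rfl

theorem dfsA_first_append_of_seen (seen : PySem.Set String) (pre l : List String)
    (h : ∀ x ∈ pre, PySem.Set.contains seen x = true) :
    dfsA_first seen (pre ++ l) = dfsA_first seen l := by
  induction pre with
  | nil => rfl
  | cons y ys ih =>
    rw [List.cons_append, dfsA_first]
    simp only [h y List.mem_cons_self, if_true]
    exact ih (fun x hx => h x (List.mem_cons_of_mem _ hx))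

theorem dfsA_first_eq_find (seen : PySem.Set String) (l : List String) :
    dfsA_first seen l = Option.map Prod.fst (dfsB_find seen l) := by
  induction l with
  | nil => rfl
  | cons y ys ih =>
    rw [dfsA_first, dfsB_find]
    cases hy : PySem.Set.contains seen y
    · simp only [Bool.false_eq_true, if_false, Option.map_some]
    · simp only [if_true]; exact ih

theorem phiA_pop_seen_lt (tree : List (String × List String)) (init : String)
    (seen : PySem.Set String) (stud : String) (rest : List String)
    (hcs : PySem.Set.contains seen stud = true) :
    phiA tree init seen rest < phiA tree init seen (stud :: rest) := by
  unfold phiA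
  rw [pvPend_cons]
  have h1 := pvPend_le seen rest
  simp only [hcs, if_true, List.length_cons]
  omega

theorem phiA_norm_lt (tree : List (String × List String)) (init : String)
    (seen : PySem.Set String) (stud know : String) (rest : List String)
    (hcs : PySem.Set.contains seen stud = true)
    (hk : PySem.Set.contains seen know = false)
    (hkm : know ∈ pvNodes tree init) :
    phiA tree init (PySem.Set.add seen know) (know :: stud :: rest)
      < phiA tree init seen (stud :: rest) := by
  unfold phiA
  rw [pvPend_cons, pvPend_cons]
  have h1 := pvNS_add_lt tree init seen know hkm hk
  simp only [pv_contains_add_self, hcs, if_true, List.length_cons]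
  omega

theorem pv_sim (tree : List (String × List String)) (init : String) :
    ∀ (n : Nat) (seen : PySem.Set String) (us : List String) (its : List (List String))
      (hNA : ∀ x ∈ us, x ∈ pvNodes tree init)
      (hNB : ∀ l ∈ its, ∀ x ∈ l, x ∈ pvNodes tree init),
      phiA tree init seen us ≤ n →
      List.Forall₂ (fun u it => ∃ pre, adjB tree u = pre ++ it ∧
        ∀ x ∈ pre, PySem.Set.contains seen x = true) us its →
      (∀ u ∈ us, PySem.Set.contains seen u = true) →
      dfsA_loop tree init seen us hNA = dfsB_loop tree init seen its hNB := by
  intro n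
  induction n with
  | zero =>
    intro seen us its hNA hNB hphi hrel hmem
    cases hrel with
    | nil => rw [dfsA_loop.eq_1, dfsB_loop.eq_1]
    | cons hhead htail =>
      exfalso
      unfold phiA at hphi
      rw [List.length_cons] at hphi
      omega
  | succ n ih =>
    intro seen us its hNA hNB hphi hrel hmem
    cases hrel with
    | nil => rw [dfsA_loop.eq_1, dfsB_loop.eq_1]
    | @cons stud it rest irest hhead htail =>
      obtain ⟨pre, hadj, hpre⟩ := hhead
      have hcs : PySem.Set.contains seen stud = true := hmem stud List.mem_cons_self
      rw [dfsA_loop.eq_2, dfsB_loop.eq_2]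
      simp only [hcs, if_true]
      split
      · -- A: 'stud not in tree' → pop
        rename_i heq
        have hadj0 : adjB tree stud = [] := by unfold adjB; rw [heq]; rfl
        rw [hadj0] at hadj
        obtain ⟨h1, h2⟩ := List.append_eq_nil_iff.mp hadj.symm
        subst h2
        split
        · -- B: iterator exhausted → pop
          exact ih seen rest irest _ _
            (Nat.lt_succ_iff.mp (Nat.lt_of_lt_of_le
              (phiA_pop_seen_lt tree init seen stud rest hcs) hphi))
            htail (fun u hu => hmem u (List.mem_cons_of_mem _ hu))
        · rename_i know it' heqb
          simp [dfsB_find] at heqb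
      · -- A: tree[stud] = adj
        rename_i adj heq
        have hadjeq : adjB tree stud = adj := by unfold adjB; rw [heq]; rfl
        rw [hadjeq] at hadj
        have hfirst : dfsA_first seen adj = Option.map Prod.fst (dfsB_find seen it) := by
          rw [hadj, dfsA_first_append_of_seen seen pre it hpre, dfsA_first_eq_find]
        split
        · -- A found an unseen neighbour 'know' → push
          rename_i know hfd
          simp only [hcs, if_true] at hfd
          rw [hfd] at hfirst
          split
          · rename_i heqb
            rw [heqb] at hfirst
            simp at hfirst
          · rename_i know' it' heqb
            rw [heqb] at hfirst
            simp only [Option.map_some] at hfirst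
            injection hfirst with hkk
            subst hkk
            obtain ⟨pre2, hpre2eq, hpre2, hknz⟩ := dfsB_find_some seen it know it' heqb
            have hkinadj : know ∈ adj := by
              rw [hadj, hpre2eq]
              exact List.mem_append_right _ (List.mem_append_right _ List.mem_cons_self)
            have hkmem : know ∈ pvNodes tree init :=
              pv_adj_subset tree init stud adj heq know hkinadj
            rw [pv_normA tree init seen know (stud :: rest) hknz _]
            apply ih
            · exact Nat.lt_succ_iff.mp (Nat.lt_of_lt_of_le
                (phiA_norm_lt tree init seen stud know rest hcs hknz hkmem) hphi)
            · refine List.Forall₂.cons ⟨[], rfl, fun x hx => nomatch hx⟩ ?_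
              refine List.Forall₂.cons ⟨pre ++ pre2 ++ [know], ?_, ?_⟩ ?_
              · rw [hadjeq, hadj, hpre2eq]
                simp [List.append_assoc]
              · intro x hx
                rcases List.mem_append.mp hx with hx1 | hx2
                · rcases List.mem_append.mp hx1 with hx3 | hx4
                  · exact pv_contains_add_of seen know x (hpre x hx3)
                  · exact pv_contains_add_of seen know x (hpre2 x hx4)
                · rcases List.mem_cons.mp hx2 with rfl | hx5
                  · exact pv_contains_add_self seen x
                  · cases hx5
              · exact htail.imp (fun u itu ⟨p, hp, hm⟩ =>
                  ⟨p, hp, fun x hx => pv_contains_add_of seen know x (hm x hx)⟩)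
            · intro u hu
              rcases List.mem_cons.mp hu with rfl | hu'
              · exact pv_contains_add_self seen u
              · exact pv_contains_add_of seen know u (hmem u hu')
        · -- all of tree[stud] already seen → pop
          rename_i hfd
          simp only [hcs, if_true] at hfd
          rw [hfd] at hfirst
          split
          · exact ih seen rest irest _ _
              (Nat.lt_succ_iff.mp (Nat.lt_of_lt_of_le
                (phiA_pop_seen_lt tree init seen stud rest hcs) hphi))
              htail (fun u hu => hmem u (List.mem_cons_of_mem _ hu))
          · rename_i know' it' heqb
            rw [heqb] at hfirst
            simp at hfirst

-- ===== VERDICT (by name: the statement is the Claim_ definition above) =====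
theorem dfs_stk_spec : Claim_equal_dfs_stk := by
  unfold Claim_equal_dfs_stk Spec_dfs_stk
  intro tree init _
  unfold dfs_stk dfs_stk_alt
  apply pv_sim tree init (phiA tree init (PySem.Set.ofList [init]) [init]) _ _ _ _ _ (Nat.le_refl _)
  · exact List.Forall₂.cons ⟨[], rfl, fun x hx => nomatch hx⟩ List.Forall₂.nil
  · intro u hu
    rcases List.mem_cons.mp hu with rfl | hu'
    · rw [PySem.Set.contains_iff, PySem.Set.mem_ofList]
      exact List.mem_cons_self
    · cases hu'
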